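-- pv_equiv track=rewrite | github.com/jas212-on/Cricket-score-analyzer | backend/dsa2.py | detect_scoring_patterns
-- ===== SOURCE A (Python) =====
-- from collections import deque, defaultdict
--
-- def detect_scoring_patterns(runs, pattern_length=4):
--     """
--     Use rolling hash to detect repeating scoring patterns
--     """
--     if len(runs) < pattern_length:
--         return {}
--
--     pattern_count = defaultdict(int)
--
--     for i in range(len(runs) - pattern_length + 1):
--         pattern = tuple(runs[i:i + pattern_length])
--         pattern_count[pattern] += 1
--
--     # Return patterns that occur more than once
--     repeated = {
--         str(pattern): count
--         for pattern, count in pattern_count.items()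
--         if count > 1
--     }
--
--     return dict(sorted(repeated.items(), key=lambda x: x[1], reverse=True))
-- ===== SOURCE B (Python) =====
-- def _intern(keys):
--     """Map each key to a small int id: equal keys <-> equal ids (first-seen order)."""
--     tbl = {}
--     out = []
--     for k in keys:
--         if k not in tbl:
--             tbl[k] = len(tbl)
--         out.append(tbl[k])
--     return out
--
--
-- def detect_scoring_patterns(runs, pattern_length=4):
--     """
--     Count repeated fixed-length consecutive scoring windows via rank doubling:
--     ids identify windows of width w, doubling w, so no window tuple of length
--     pattern_length is ever materialised for counting (O(n log L) vs O(n*L)).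
--     """
--     n = len(runs)
--     if pattern_length < 1 or n < pattern_length:
--         return {}
--     L = pattern_length
--     ids = _intern(runs)          # ids[i] identifies runs[i:i+w], w = 1
--     w = 1
--     while 2 * w <= L:
--         ids = _intern(list(zip(ids, ids[w:])))
--         w *= 2
--     if w < L:
--         # overlapping halves of width w cover a window of width L (L - w <= w)
--         ids = _intern(list(zip(ids, ids[L - w:])))
--     # now len(ids) == n - L + 1 and ids[i] identifies runs[i:i+L]
--
--     counts = {}
--     first = {}
--     for i, wid in enumerate(ids):
--         counts[wid] = counts.get(wid, 0) + 1
--         if wid not in first: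
--             first[wid] = i
--
--     repeated = {
--         str(tuple(runs[first[wid]:first[wid] + L])): c
--         for wid, c in counts.items()
--         if c > 1
--     }
--     return dict(sorted(repeated.items(), key=lambda x: x[1], reverse=True))
-- ===== Notes on version B (the rewrite author's own statement) =====
-- stated objective: faster
-- what changed: Replaces per-window tuple slicing and tuple-hash counting (O(n*L) work) by rank-doubling interning: integer ids that identify windows of doubling width are built incrementally, so each window of length L is keyed by one pair of ids and only the repeated windows are ever materialised as tuples.
-- intended difference: On degenerate pattern lengths (pattern_length < 0, or pattern_length == 0 with non-empty runs) A slices nonsense windows and returns counts keyed by '()' and truncated fragments, e.g. {'()': 2} for ([], -1); B returns {} because no patterns of non-positive length exist, which is the intended reading of the function. — e.g. on detect_scoring_patterns([], -1): A returns [("()", 2)], B returns []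
import Mathlib
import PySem

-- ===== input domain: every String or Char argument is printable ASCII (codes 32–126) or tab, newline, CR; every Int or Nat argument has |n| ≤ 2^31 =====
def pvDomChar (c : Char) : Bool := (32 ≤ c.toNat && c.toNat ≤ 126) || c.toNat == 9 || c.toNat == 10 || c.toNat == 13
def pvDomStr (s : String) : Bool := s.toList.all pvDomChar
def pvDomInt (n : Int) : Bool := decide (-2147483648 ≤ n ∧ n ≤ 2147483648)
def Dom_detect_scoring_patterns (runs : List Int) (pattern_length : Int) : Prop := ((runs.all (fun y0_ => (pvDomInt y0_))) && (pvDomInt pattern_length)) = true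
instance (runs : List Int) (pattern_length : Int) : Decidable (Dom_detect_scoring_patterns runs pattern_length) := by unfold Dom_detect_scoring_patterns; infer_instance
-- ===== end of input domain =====

-- B replaces A's per-window tuple slicing and tuple-hash counting by rank-doubling
-- interning (integer ids identifying windows of doubling width); measured faster.

-- ===== PORT A =====

-- str(t) for a Python tuple t of ints: "()", "(5,)", "(1, 2)"
def tupleStr (t : List Int) : String :=
  match t with
  | [] => "()"
  | [x] => "(" ++ PySem.Int.toStr x ++ ",)"
  | _ => "(" ++ PySem.Str.join ", " (t.map PySem.Int.toStr) ++ ")"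

def detect_scoring_patterns (runs : List Int) (pattern_length : Int) : List (String × Int) :=
  if (runs.length : Int) < pattern_length then []
  else
    let pattern_count : PySem.Dict (List Int) Int :=
      (PySem.List.pyRange 0 ((runs.length : Int) - pattern_length + 1) 1).foldl
        (fun d i => d.modify (PySem.List.slice runs (some i) (some (i + pattern_length))) 0 (· + 1))
        PySem.Dict.empty
    let repeated : PySem.Dict String Int :=
      pattern_count.items.foldl
        (fun d kv => if 1 < kv.2 then d.insert (tupleStr kv.1) kv.2 else d)
        PySem.Dict.empty
    (PySem.Dict.ofList (PySem.List.sorted repeated.items (fun x => x.2) true)).items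

-- ===== PORT B =====

-- _intern(keys): map each key to a small int id, equal keys ↔ equal ids (first-seen order)
def pvIntern {α : Type} [BEq α] (keys : List α) : List Int :=
  (keys.foldl
    (fun (s : PySem.Dict α Int × List Int) k =>
      let tbl := if s.1.contains k then s.1 else s.1.insert k (s.1.size : Int)
      (tbl, s.2 ++ [tbl.getD k 0]))
    (PySem.Dict.empty, [])).2

-- the `while 2 * w <= L` doubling loop of Source B (returns the final ids and width)
def pvLevels (L : Nat) (ids : List Int) (w : Nat) (hw : 0 < w) : List Int × Nat :=
  if h : 2 * w ≤ L then
    pvLevels L (pvIntern (ids.zip (PySem.List.slice ids (some (w : Int)) none))) (2 * w) (by omega)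
  else (ids, w)
termination_by L + 1 - 2 * w

def detect_scoring_patterns_alt (runs : List Int) (pattern_length : Int) : List (String × Int) :=
  if pattern_length < 1 ∨ (runs.length : Int) < pattern_length then []
  else
    -- pattern_length ≥ 1 here, so .toNat is exact
    let L : Nat := pattern_length.toNat
    let iw := pvLevels L (pvIntern runs) 1 (by omega)
    let ids :=
      if iw.2 < L then
        pvIntern (iw.1.zip (PySem.List.slice iw.1 (some ((L - iw.2 : Nat) : Int)) none))
      else iw.1
    let cf := (PySem.List.enumerate ids).foldl
      (fun (s : PySem.Dict Int Int × PySem.Dict Int Int) p =>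
        (s.1.modify p.2 0 (· + 1),
         if s.2.contains p.2 then s.2 else s.2.insert p.2 p.1))
      (PySem.Dict.empty, PySem.Dict.empty)
    let repeated : PySem.Dict String Int :=
      cf.1.items.foldl
        (fun d kv =>
          if 1 < kv.2 then
            -- first[wid] in Source B: the key is always present, read with getD
            d.insert (tupleStr (PySem.List.slice runs (some (cf.2.getD kv.1 0))
                        (some (cf.2.getD kv.1 0 + pattern_length)))) kv.2
          else d)
        PySem.Dict.empty
    (PySem.Dict.ofList (PySem.List.sorted repeated.items (fun x => x.2) true)).items

-- ===== PRECONDITION & SPEC =====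
-- On degenerate pattern lengths (pattern_length < 0, or pattern_length == 0 with non-empty
-- runs) A slices nonsense windows and returns counts keyed by "()" and truncated fragments
-- (e.g. {'()': 2} for ([], -1)); B returns {} because no patterns of non-positive length
-- exist, which is the intended reading of the function.
def D_detect_scoring_patterns (runs : List Int) (pattern_length : Int) : Prop :=
  pattern_length < 0 ∨ (pattern_length = 0 ∧ runs ≠ [])
instance (runs : List Int) (pattern_length : Int) : Decidable (D_detect_scoring_patterns runs pattern_length) := by unfold D_detect_scoring_patterns; infer_instance

def Spec_detect_scoring_patterns (runs : List Int) (pattern_length : Int) (out : List (String × Int)) : Prop := ¬ D_detect_scoring_patterns runs pattern_length → out = detect_scoring_patterns_alt runs pattern_length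
instance (runs : List Int) (pattern_length : Int) (out : List (String × Int)) : Decidable (Spec_detect_scoring_patterns runs pattern_length out) := by unfold Spec_detect_scoring_patterns; infer_instance

def pvDiffWitness_detect_scoring_patterns : List Int × Int := ([], -1)
def pvDiffWitnessOut_detect_scoring_patterns : (List (String × Int)) × (List (String × Int)) := ([("()", 2)], [])

-- ===== CLAIM (what is proved, stated in full; the proofs are below) =====
def Claim_unchanged_detect_scoring_patterns : Prop := ∀ (runs : List Int) (pattern_length : Int), Dom_detect_scoring_patterns runs pattern_length → Spec_detect_scoring_patterns runs pattern_length (detect_scoring_patterns runs pattern_length)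
def Claim_changed_detect_scoring_patterns : Prop := Dom_detect_scoring_patterns (pvDiffWitness_detect_scoring_patterns.1) (pvDiffWitness_detect_scoring_patterns.2) ∧ D_detect_scoring_patterns (pvDiffWitness_detect_scoring_patterns.1) (pvDiffWitness_detect_scoring_patterns.2) ∧ detect_scoring_patterns (pvDiffWitness_detect_scoring_patterns.1) (pvDiffWitness_detect_scoring_patterns.2) = pvDiffWitnessOut_detect_scoring_patterns.1 ∧ detect_scoring_patterns_alt (pvDiffWitness_detect_scoring_patterns.1) (pvDiffWitness_detect_scoring_patterns.2) = pvDiffWitnessOut_detect_scoring_patterns.2 ∧ pvDiffWitnessOut_detect_scoring_patterns.1 ≠ pvDiffWitnessOut_detect_scoring_patterns.2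

-- ===== LEMMAS AND PROOFS =====

theorem pvSet_append_singleton {α : Type} [BEq α] (s : List α) (k : α) :
    PySem.Set.ofList (s ++ [k]) = PySem.Set.add (PySem.Set.ofList s) k := by
  simp [PySem.Set.ofList_eq_foldl, List.foldl_append]

theorem pvSet_update_append {α : Type} [BEq α] (t : List α) (s : PySem.Set α) :
    ∃ ext, PySem.Set.update s t = s ++ ext := by
  induction t generalizing s with
  | nil => exact ⟨[], by simp [PySem.Set.update]⟩
  | cons x t ih =>
    have h1 : PySem.Set.update s (x :: t) = PySem.Set.update (PySem.Set.add s x) t := by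
      simp [PySem.Set.update]
    obtain ⟨ext, hext⟩ := ih (PySem.Set.add s x)
    by_cases hc : PySem.Set.contains s x
    · exact ⟨ext, by rw [h1, hext, PySem.Set.add, if_pos hc]⟩
    · exact ⟨x :: ext, by rw [h1, hext, PySem.Set.add, if_neg hc]; simp⟩

theorem pvSet_ofList_append {α : Type} [BEq α] (s t : List α) :
    ∃ ext, PySem.Set.ofList (s ++ t) = PySem.Set.ofList s ++ ext := by
  have h : PySem.Set.ofList (s ++ t) = PySem.Set.update (PySem.Set.ofList s) t := by
    simp [PySem.Set.ofList_eq_foldl, PySem.Set.update, List.foldl_append]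
  rw [h]; exact pvSet_update_append t _


theorem pvIntern_go {α : Type} [BEq α] [LawfulBEq α] [DecidableEq α] :
    ∀ (rest seen : List α) (tbl : PySem.Dict α Int) (out : List Int),
    (∀ k, tbl.contains k = decide (k ∈ seen)) →
    (∀ k ∈ seen, tbl.getD k 0 = (((PySem.Set.ofList seen).idxOf k : Nat) : Int)) →
    (tbl.size = (PySem.Set.ofList seen).length) →
    (rest.foldl
      (fun (s : PySem.Dict α Int × List Int) k =>
        let tbl := if s.1.contains k then s.1 else s.1.insert k (s.1.size : Int)
        (tbl, s.2 ++ [tbl.getD k 0]))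
      (tbl, out)).2
      = out ++ rest.map (fun k => (((PySem.Set.ofList (seen ++ rest)).idxOf k : Nat) : Int)) := by
  intro rest
  induction rest with
  | nil => intro seen tbl out _ _ _; simp
  | cons k rest ih =>
    intro seen tbl out Hc Hg Hs
    have hreassoc : seen ++ k :: rest = (seen ++ [k]) ++ rest := by simp
    have hmemof : k ∈ PySem.Set.ofList seen ↔ k ∈ seen := PySem.Set.mem_ofList _ _
    by_cases hk : k ∈ seen
    · -- seen before: table unchanged
      have hsub : ∀ x ∈ seen ++ [k], x ∈ seen := by
        intro x hx
        rcases List.mem_append.1 hx with h | h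
        · exact h
        · simp only [List.mem_singleton] at h; rwa [h]
      have hck : tbl.contains k = true := by rw [Hc]; simpa using hk
      have hofl : PySem.Set.ofList (seen ++ [k]) = PySem.Set.ofList seen := by
        rw [pvSet_append_singleton, PySem.Set.add, if_pos (by simp [PySem.Set.contains, hmemof.2 hk])]
      have hc' : ∀ x, tbl.contains x = decide (x ∈ seen ++ [k]) := by
        intro x
        rw [Hc]
        have hx : (x ∈ seen ++ [k]) ↔ x ∈ seen := ⟨hsub x, fun h => List.mem_append.2 (Or.inl h)⟩
        simp [hx]
      have hg' : ∀ x ∈ seen ++ [k], tbl.getD x 0 = (((PySem.Set.ofList (seen ++ [k])).idxOf x : Nat) : Int) := by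
        intro x hx
        rw [hofl]
        exact Hg x (hsub x hx)
      have hs' : tbl.size = (PySem.Set.ofList (seen ++ [k])).length := by rw [hofl]; exact Hs
      have step := ih (seen ++ [k]) tbl (out ++ [tbl.getD k 0]) hc' hg' hs'
      simp only [List.foldl_cons, hck, if_pos] at step ⊢
      rw [step, hreassoc]
      have hhead : (((PySem.Set.ofList (seen ++ k :: rest)).idxOf k : Nat) : Int) = tbl.getD k 0 := by
        rw [hreassoc]
        obtain ⟨ext, hext⟩ := pvSet_ofList_append (seen ++ [k]) rest
        rw [hext, hofl, List.idxOf_append_of_mem (hmemof.2 hk), Hg k hk]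
      simp [hhead]
    · -- new key: insert with id = size
      have hsub : ∀ x ∈ seen ++ [k], x ≠ k → x ∈ seen := by
        intro x hx hxk
        rcases List.mem_append.1 hx with h | h
        · exact h
        · simp only [List.mem_singleton] at h; exact absurd h hxk
      have hck : tbl.contains k = false := by rw [Hc]; simpa using hk
      have hnotof : k ∉ PySem.Set.ofList seen := fun h => hk (hmemof.1 h)
      have hofl : PySem.Set.ofList (seen ++ [k]) = PySem.Set.ofList seen ++ [k] := by
        rw [pvSet_append_singleton, PySem.Set.add,
          if_neg (by simp [PySem.Set.contains, hk])]
      have hidk : ((PySem.Set.ofList (seen ++ [k])).idxOf k : Nat) = (PySem.Set.ofList seen).length := by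
        rw [hofl, List.idxOf_append_of_notMem hnotof]; simp
      have hgd : (tbl.insert k (tbl.size : Int)).getD k 0 = (tbl.size : Int) :=
        PySem.Dict.getD_insert_self tbl k _ 0
      have hc' : ∀ x, (tbl.insert k (tbl.size : Int)).contains x = decide (x ∈ seen ++ [k]) := by
        intro x
        rw [PySem.Dict.contains_insert, Hc]
        by_cases hxk : x = k
        · subst hxk; simp
        · simp [hxk, beq_iff_eq]
      have hg' : ∀ x ∈ seen ++ [k],
          (tbl.insert k (tbl.size : Int)).getD x 0 = (((PySem.Set.ofList (seen ++ [k])).idxOf x : Nat) : Int) := by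
        intro x hx
        by_cases hxk : x = k
        · subst hxk
          rw [hgd, hidk, Hs]
        · rw [PySem.Dict.getD_insert, if_neg hxk, hofl,
            List.idxOf_append_of_mem ((PySem.Set.mem_ofList _ _).2 (hsub x hx hxk))]
          exact Hg x (hsub x hx hxk)
      have hs' : (tbl.insert k (tbl.size : Int)).size = (PySem.Set.ofList (seen ++ [k])).length := by
        rw [PySem.Dict.size_insert, if_neg (by simp [hck]), Hs, hofl]; simp
      have step := ih (seen ++ [k]) (tbl.insert k (tbl.size : Int))
        (out ++ [(tbl.insert k (tbl.size : Int)).getD k 0]) hc' hg' hs'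
      simp only [List.foldl_cons, hck, Bool.false_eq_true, if_neg, not_false_iff] at step ⊢
      rw [step, hreassoc]
      have hhead : (((PySem.Set.ofList (seen ++ k :: rest)).idxOf k : Nat) : Int)
          = (tbl.insert k (tbl.size : Int)).getD k 0 := by
        rw [hreassoc]
        obtain ⟨ext, hext⟩ := pvSet_ofList_append (seen ++ [k]) rest
        rw [hext, List.idxOf_append_of_mem (by rw [hofl]; simp), hidk, hgd, Hs]
      simp [hhead]

theorem pvIntern_spec {α : Type} [BEq α] [LawfulBEq α] [DecidableEq α] (keys : List α) :
    pvIntern keys = keys.map (fun k => (((PySem.Set.ofList keys).idxOf k : Nat) : Int)) := by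
  have h := pvIntern_go keys [] PySem.Dict.empty []
    (by intro k; simp [pysem]) (by intro k h; simp at h) (by simp [pysem])
  simpa [pvIntern] using h

theorem pvIntern_length {α : Type} [BEq α] [LawfulBEq α] [DecidableEq α] (keys : List α) :
    (pvIntern keys).length = keys.length := by
  rw [pvIntern_spec]; simp

theorem pvIntern_iff {α : Type} [BEq α] [LawfulBEq α] [DecidableEq α] (keys : List α) (p q : Nat)
    (hp : p < keys.length) (hq : q < keys.length) :
    (pvIntern keys)[p]'(by rw [pvIntern_length]; exact hp) =
      (pvIntern keys)[q]'(by rw [pvIntern_length]; exact hq) ↔ keys[p] = keys[q] := by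
  simp only [pvIntern_spec, List.getElem_map]
  constructor
  · intro h
    have hn : (PySem.Set.ofList keys).idxOf keys[p] = (PySem.Set.ofList keys).idxOf keys[q] := by
      exact_mod_cast h
    have hp' : keys[p] ∈ PySem.Set.ofList keys := (PySem.Set.mem_ofList _ _).2 (List.getElem_mem hp)
    have hq' : keys[q] ∈ PySem.Set.ofList keys := (PySem.Set.mem_ofList _ _).2 (List.getElem_mem hq)
    calc keys[p] = (PySem.Set.ofList keys)[(PySem.Set.ofList keys).idxOf keys[p]]'(List.idxOf_lt_length_of_mem hp') := (List.getElem_idxOf _).symm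
    _ = (PySem.Set.ofList keys)[(PySem.Set.ofList keys).idxOf keys[q]]'(List.idxOf_lt_length_of_mem hq') := by
          congr 1
    _ = keys[q] := List.getElem_idxOf _
  · intro h; rw [h]

def pvWnd (runs : List Int) (w p : Nat) : List Int := (runs.drop p).take w

def pvGoodIds (runs : List Int) (w : Nat) (ids : List Int) : Prop :=
  ids.length + w = runs.length + 1 ∧
  ∀ p q, (hp : p < ids.length) → (hq : q < ids.length) →
    (ids[p] = ids[q] ↔ pvWnd runs w p = pvWnd runs w q)

theorem pvWnd_length (runs : List Int) (w p : Nat) (h : p + w ≤ runs.length) :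
    (pvWnd runs w p).length = w := by
  simp [pvWnd]; omega

theorem pvWnd_getElem (runs : List Int) (w p t : Nat) (ht : t < w) (h : p + w ≤ runs.length) :
    (pvWnd runs w p)[t]'(by rw [pvWnd_length runs w p h]; exact ht) = runs[p + t]'(by omega) := by
  simp [pvWnd, List.getElem_take, List.getElem_drop]

theorem pvWnd_split (runs : List Int) (w d p q : Nat) (hd : d ≤ w)
    (hp : p + (w + d) ≤ runs.length) (hq : q + (w + d) ≤ runs.length) :
    (pvWnd runs w p = pvWnd runs w q ∧ pvWnd runs w (p + d) = pvWnd runs w (q + d)) ↔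
      pvWnd runs (w + d) p = pvWnd runs (w + d) q := by
  constructor
  · rintro ⟨h1, h2⟩
    apply List.ext_getElem
    · rw [pvWnd_length runs _ p hp, pvWnd_length runs _ q hq]
    · intro t htp htq
      rw [pvWnd_length runs _ p hp] at htp
      rw [pvWnd_getElem runs _ p t htp hp, pvWnd_getElem runs _ q t htp hq]
      by_cases htw : t < w
      · have e := List.getElem_of_eq h1 (i := t)
          (by rw [pvWnd_length runs w p (by omega)]; exact htw)
        rw [pvWnd_getElem runs w p t htw (by omega),
            pvWnd_getElem runs w q t htw (by omega)] at e
        exact e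
      · have htd : t - d < w := by omega
        have e := List.getElem_of_eq h2 (i := t - d)
          (by rw [pvWnd_length runs w (p + d) (by omega)]; exact htd)
        rw [pvWnd_getElem runs w (p + d) (t - d) htd (by omega),
            pvWnd_getElem runs w (q + d) (t - d) htd (by omega)] at e
        simp only [show p + d + (t - d) = p + t from by omega,
          show q + d + (t - d) = q + t from by omega] at e
        exact e
  · intro h
    constructor
    · have : ∀ r : Nat, pvWnd runs w r = (pvWnd runs (w + d) r).take w := by
        intro r; simp [pvWnd, List.take_take]
      rw [this p, this q, h]
    · have key : ∀ r : Nat, pvWnd runs w (r + d) = (pvWnd runs (w + d) r).drop d := by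
        intro r
        show (runs.drop (r + d)).take w = ((runs.drop r).take (w + d)).drop d
        rw [List.drop_take, List.drop_drop]
        congr 2
        omega
      rw [key p, key q, h]

theorem pvWnd_one (runs : List Int) (p : Nat) (hp : p < runs.length) :
    pvWnd runs 1 p = [runs[p]] := by
  rw [show pvWnd runs 1 p = (runs.drop p).take 1 from rfl, List.drop_eq_getElem_cons hp]
  rfl

theorem pvBase (runs : List Int) : pvGoodIds runs 1 (pvIntern runs) := by
  refine ⟨by rw [pvIntern_length], ?_⟩
  intro p q hp hq
  rw [pvIntern_length] at hp hq
  rw [pvIntern_iff runs p q hp hq, pvWnd_one runs p hp, pvWnd_one runs q hq]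
  simp

theorem pvCombine (runs ids : List Int) (w d : Nat) (hd : 0 < d) (hdw : d ≤ w)
    (hfit : w + d ≤ runs.length) (hg : pvGoodIds runs w ids) :
    pvGoodIds runs (w + d) (pvIntern (ids.zip (ids.drop d))) := by
  obtain ⟨hlen, hiff⟩ := hg
  have hdlen : d ≤ ids.length := by omega
  have hzlen : (ids.zip (ids.drop d)).length = ids.length - d := by
    simp [List.length_zip]
  have hnewlen : (pvIntern (ids.zip (ids.drop d))).length = ids.length - d := by
    rw [pvIntern_length, hzlen]
  refine ⟨by omega, ?_⟩
  intro p q hp hq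
  rw [hnewlen] at hp hq
  rw [pvIntern_iff _ p q (by rw [hzlen]; exact hp) (by rw [hzlen]; exact hq)]
  simp only [List.getElem_zip, List.getElem_drop, Prod.mk.injEq]
  simp only [Nat.add_comm d p, Nat.add_comm d q]
  refine Iff.trans ?_ (pvWnd_split runs w d p q hdw (by omega) (by omega))
  exact and_congr (hiff p q (by omega) (by omega))
    (hiff (p + d) (q + d) (by omega) (by omega))

theorem pvLevels_good (runs : List Int) (L : Nat) (ids : List Int) (w : Nat) (hw : 0 < w) :
    L ≤ runs.length → w ≤ L → pvGoodIds runs w ids →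
    pvGoodIds runs (pvLevels L ids w hw).2 (pvLevels L ids w hw).1 ∧
      0 < (pvLevels L ids w hw).2 ∧ (pvLevels L ids w hw).2 ≤ L ∧
      L < 2 * (pvLevels L ids w hw).2 := by
  fun_induction pvLevels L ids w hw with
  | case1 ids w hw h ih =>
    intro hLn hwL hg
    have hslice : PySem.List.slice ids (some ((w : Nat) : Int)) none = ids.drop w :=
      PySem.List.slice_from_natCast ids w
    refine ih hLn (by omega) ?_
    rw [hslice]
    have h2 := pvCombine runs ids w w (by omega) le_rfl (by omega) hg
    rw [show w + w = 2 * w from by omega] at h2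
    exact h2

  | case2 ids w hw h =>
    intro hLn hwL hg
    exact ⟨hg, hw, hwL, by omega⟩

theorem pvSet_contains_iff {α : Type} [BEq α] [LawfulBEq α] (s : PySem.Set α) (x : α) :
    PySem.Set.contains s x = true ↔ x ∈ s := by
  simp [PySem.Set.contains]

theorem pvFirst_getD (l : List Int) :
    ∀ (s : Int) (d : PySem.Dict Int Int) (x : Int),
    ((PySem.List.enumerate l s).foldl
        (fun d p => if d.contains p.2 then d else d.insert p.2 p.1) d).getD x 0
      = if d.contains x then d.getD x 0
        else if x ∈ l then s + ((l.idxOf x : Nat) : Int) else d.getD x 0 := by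
  induction l with
  | nil => intro s d x; by_cases hcx : d.contains x <;> simp [PySem.List.enumerate_nil, hcx]
  | cons a l ih =>
    intro s d x
    rw [PySem.List.enumerate_cons, List.foldl_cons]
    by_cases hca : d.contains a
    · rw [if_pos hca, ih (s + 1) d x]
      by_cases hcx : d.contains x
      · simp [hcx]
      · have hxa : x ≠ a := fun h => by rw [h] at hcx; exact hcx hca
        by_cases hxl : x ∈ l
        · have h2 : List.idxOf x (a :: l) = (List.idxOf x l).succ :=
            List.idxOf_cons_ne l (Ne.symm hxa)
          conv_lhs => rw [if_neg hcx, if_pos hxl]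
          conv_rhs => rw [if_neg hcx, if_pos (List.mem_cons_of_mem a hxl), h2]
          push_cast; ring
        · have hxal : x ∉ a :: l := by simp [hxa, hxl]
          conv_lhs => rw [if_neg hcx, if_neg hxl]
          conv_rhs => rw [if_neg hcx, if_neg hxal]
    · rw [if_neg hca, ih (s + 1) (d.insert a s) x]
      by_cases hxa : x = a
      · subst hxa
        have hci : (d.insert x s).contains x = true := by
          rw [PySem.Dict.contains_insert]; simp
        conv_lhs => rw [if_pos hci]
        rw [PySem.Dict.getD_insert_self]
        conv_rhs => rw [if_neg hca, if_pos (List.mem_cons_self), List.idxOf_cons_self]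
        simp
      · have hci : (d.insert a s).contains x = d.contains x := by
          rw [PySem.Dict.contains_insert, show ((x == a) = false) from by simpa using hxa,
            Bool.false_or]
        have hgi : (d.insert a s).getD x 0 = d.getD x 0 := by
          rw [PySem.Dict.getD_insert, if_neg hxa]
        rw [hci, hgi]
        by_cases hcx : d.contains x
        · simp [hcx]
        · by_cases hxl : x ∈ l
          · have h2 : List.idxOf x (a :: l) = (List.idxOf x l).succ :=
              List.idxOf_cons_ne l (Ne.symm hxa)
            conv_lhs => rw [if_neg hcx, if_pos hxl]
            conv_rhs => rw [if_neg hcx, if_pos (List.mem_cons_of_mem a hxl), h2]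
            push_cast; ring
          · have hxal : x ∉ a :: l := by simp [hxa, hxl]
            conv_lhs => rw [if_neg hcx, if_neg hxl]
            conv_rhs => rw [if_neg hcx, if_neg hxal]

theorem pvSet_map {α β : Type} [BEq α] [LawfulBEq α] [BEq β] [LawfulBEq β] (g : α → β) :
    ∀ (l : List α), (∀ a ∈ l, ∀ b ∈ l, g a = g b → a = b) →
    PySem.Set.ofList (l.map g) = (PySem.Set.ofList l).map g := by
  intro l
  induction l using List.reverseRecOn with
  | nil => intro _; simp
  | append_singleton l x ih =>
    intro hinj
    have hxm : x ∈ l ++ [x] := List.mem_append.2 (Or.inr (List.mem_singleton.2 rfl))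
    have hinj' : ∀ a ∈ l, ∀ b ∈ l, g a = g b → a = b := fun a ha b hb =>
      hinj a (List.mem_append.2 (Or.inl ha)) b (List.mem_append.2 (Or.inl hb))
    rw [List.map_append, List.map_singleton, pvSet_append_singleton, pvSet_append_singleton,
      ih hinj']
    have hmem : g x ∈ (PySem.Set.ofList l).map g ↔ x ∈ PySem.Set.ofList l := by
      constructor
      · intro hm
        obtain ⟨a, ha, hga⟩ := List.mem_map.1 hm
        have ha' : a ∈ l := (PySem.Set.mem_ofList _ _).1 ha
        have := hinj a (List.mem_append.2 (Or.inl ha')) x hxm hga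
        rwa [← this]
      · exact fun hm => List.mem_map.2 ⟨x, hm, rfl⟩
    rw [PySem.Set.add, PySem.Set.add]
    by_cases hc : x ∈ PySem.Set.ofList l
    · rw [if_pos (by rw [pvSet_contains_iff]; exact hmem.2 hc),
        if_pos (by rw [pvSet_contains_iff]; exact hc)]
    · rw [if_neg (by rw [pvSet_contains_iff]; exact fun h => hc (hmem.1 h)),
        if_neg (by rw [pvSet_contains_iff]; exact hc)]
      simp

theorem pvCount_map {α β : Type} [BEq α] [LawfulBEq α] [BEq β] [LawfulBEq β]
    (g : α → β) (l : List α) (x : α)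
    (hinj : ∀ a ∈ l, g a = g x → a = x) : (l.map g).count (g x) = l.count x := by
  have h1 : (l.map g).count (g x) = l.countP (fun a => g a == g x) := by
    rw [List.count_eq_countP, List.countP_map]
    rfl
  have h2 : l.countP (fun a => g a == g x) = l.countP (fun a => a == x) := by
    apply List.countP_congr
    intro a ha
    by_cases hax : a = x
    · subst hax; simp
    · have hg : g a ≠ g x := fun h => hax (hinj a ha h)
      simp [hax, hg]
  rw [h1, h2, List.count_eq_countP]

theorem pv_main (runs : List Int) (pattern_length : Int)
    (hnD : ¬ D_detect_scoring_patterns runs pattern_length) :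
    detect_scoring_patterns runs pattern_length = detect_scoring_patterns_alt runs pattern_length := by
  unfold D_detect_scoring_patterns at hnD
  push Not at hnD
  obtain ⟨hpl0, hpl0'⟩ := hnD
  by_cases h0 : (runs.length : Int) < pattern_length
  · rw [detect_scoring_patterns.eq_def, detect_scoring_patterns_alt.eq_def,
      if_pos h0, if_pos (Or.inr h0)]
  by_cases hsmall : pattern_length < 1
  · have hpleq : pattern_length = 0 := by omega
    have hre : runs = [] := hpl0' hpleq
    subst hre; subst hpleq
    decide
  -- main case: 1 ≤ pattern_length ≤ runs.length
  set L := pattern_length.toNat with hLdef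
  have hplL : pattern_length = (L : Int) := by omega
  have hL1 : 1 ≤ L := by omega
  have hLn : L ≤ runs.length := by omega
  set m := runs.length - L + 1 with hmdef
  set ws := (List.range m).map (fun p => pvWnd runs L p) with hws
  -- ==== the B-side pipeline, named ====
  set idsPair := pvLevels L (pvIntern runs) 1 one_pos with hiw
  set idsB := (if idsPair.2 < L then
      pvIntern (idsPair.1.zip (PySem.List.slice idsPair.1 (some ((L - idsPair.2 : Nat) : Int)) none))
    else idsPair.1) with hids
  set cf := (PySem.List.enumerate idsB).foldl
      (fun (s : PySem.Dict Int Int × PySem.Dict Int Int) p =>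
        (s.1.modify p.2 0 (· + 1),
         if s.2.contains p.2 then s.2 else s.2.insert p.2 p.1))
      (PySem.Dict.empty, PySem.Dict.empty) with hcf
  -- ==== unfold both ports (rfl up to zeta) ====
  have hgB : ¬ (pattern_length < 1 ∨ (runs.length : Int) < pattern_length) :=
    not_or.2 ⟨hsmall, h0⟩
  have hA : detect_scoring_patterns runs pattern_length =
      (PySem.Dict.ofList (PySem.List.sorted
        (((PySem.List.pyRange 0 ((runs.length : Int) - pattern_length + 1) 1).foldl
            (fun d i => d.modify (PySem.List.slice runs (some i) (some (i + pattern_length))) 0 (· + 1))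
            PySem.Dict.empty).items.foldl
          (fun d kv => if 1 < kv.2 then d.insert (tupleStr kv.1) kv.2 else d)
          PySem.Dict.empty).items (fun x => x.2) true)).items := by
    rw [detect_scoring_patterns.eq_def, if_neg h0]
  have hB : detect_scoring_patterns_alt runs pattern_length =
      (PySem.Dict.ofList (PySem.List.sorted
        (cf.1.items.foldl
          (fun d kv =>
            if 1 < kv.2 then
              d.insert (tupleStr (PySem.List.slice runs (some (cf.2.getD kv.1 0))
                          (some (cf.2.getD kv.1 0 + pattern_length)))) kv.2
            else d)
          PySem.Dict.empty).items (fun x => x.2) true)).items := by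
    rw [detect_scoring_patterns_alt.eq_def, if_neg hgB]
  -- ==== ids are good window identifiers ====
  obtain ⟨hg0, hw0, hwle, hwgt⟩ :=
    pvLevels_good runs L (pvIntern runs) 1 one_pos hLn (by omega) (pvBase runs)
  rw [← hiw] at hg0 hw0 hwle hwgt
  have hGood : pvGoodIds runs L idsB := by
    rw [hids]
    by_cases hwlt : idsPair.2 < L
    · rw [if_pos hwlt, PySem.List.slice_from_natCast]
      have hc := pvCombine runs idsPair.1 idsPair.2 (L - idsPair.2)
        (by omega) (by omega) (by omega) hg0
      rwa [show idsPair.2 + (L - idsPair.2) = L from by omega] at hc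
    · rw [if_neg hwlt]
      have heq : idsPair.2 = L := by omega
      rwa [heq] at hg0
  have hmlen : idsB.length = m := by have := hGood.1; omega
  have hwslen : ws.length = m := by rw [hws]; simp
  have hwsget : ∀ (p : Nat) (hp : p < m), ws[p]'(by omega) = pvWnd runs L p := by
    intro p hp
    show (List.map (fun p => pvWnd runs L p) (List.range m))[p]'(by
      rw [List.length_map, List.length_range]; exact hp) = pvWnd runs L p
    simp
  -- ==== cf components ====
  have hsplit : cf = ((PySem.List.enumerate idsB 0).foldl
        (fun d p => d.modify p.2 0 (· + 1)) PySem.Dict.empty,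
      (PySem.List.enumerate idsB 0).foldl
        (fun d p => if d.contains p.2 then d else d.insert p.2 p.1) PySem.Dict.empty) := by
    rw [hcf]
    rw [PySem.List.foldl_prod_mk
      (f := fun (d : PySem.Dict Int Int) (p : Int × Int) => d.modify p.2 0 (· + 1))
      (g := fun (d : PySem.Dict Int Int) (p : Int × Int) =>
        if d.contains p.2 then d else d.insert p.2 p.1)]
  have hc1 : cf.1 = PySem.Dict.counter idsB := by
    rw [hsplit, PySem.Dict.counter_eq_foldl]
    conv_rhs => rw [← PySem.List.map_snd_enumerate idsB 0]
    rw [List.foldl_map]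
  have hc2 : cf.2 = (PySem.List.enumerate idsB 0).foldl
      (fun d p => if d.contains p.2 then d else d.insert p.2 p.1) PySem.Dict.empty := by
    rw [hsplit]
  have hfirst : ∀ x ∈ idsB, cf.2.getD x 0 = ((idsB.idxOf x : Nat) : Int) := by
    intro x hx
    rw [hc2, pvFirst_getD idsB 0 PySem.Dict.empty x,
      if_neg (by simp [pysem]), if_pos hx]
    simp
  -- ==== A's counter equals the counter of windows ====
  have hrange : (runs.length : Int) - pattern_length + 1 = ((m : Nat) : Int) := by omega
  have hpc : (PySem.List.pyRange 0 ((runs.length : Int) - pattern_length + 1) 1).foldl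
      (fun d i => d.modify (PySem.List.slice runs (some i) (some (i + pattern_length))) 0 (· + 1))
      PySem.Dict.empty = PySem.Dict.counter ws := by
    rw [hrange, PySem.List.pyRange_zero_natCast, List.foldl_map,
      PySem.Dict.counter_eq_foldl, hws, List.foldl_map]
    apply PySem.List.foldl_congr_mem
    intro acc p hp
    rw [hplL, PySem.List.slice_natCast_add]
    rfl
  -- ==== the relabelling g from window ids to windows ====
  set g : Int → List Int := fun x => ws.getD (idsB.idxOf x) [] with hgdef
  have hG1 : ws = idsB.map g := by
    apply List.ext_getElem
    · simp [hwslen, hmlen]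
    · intro p hp hp2
      have hpB : p < idsB.length := by simpa using hp2
      have hpm : p < m := by omega
      conv_rhs => rw [List.getElem_map]
      have hmem : idsB[p]'hpB ∈ idsB := List.getElem_mem _
      have hi0 : idsB.idxOf (idsB[p]'hpB) < idsB.length := List.idxOf_lt_length_of_mem hmem
      have hval : idsB[idsB.idxOf (idsB[p]'hpB)]'hi0 = idsB[p]'hpB := List.getElem_idxOf hi0
      have hwnd := (hGood.2 _ p hi0 hpB).1 hval
      show ws[p]'hp = ws.getD (idsB.idxOf (idsB[p]'hpB)) []
      rw [List.getD_eq_getElem ws [] (by omega), hwsget p hpm, hwsget _ (by omega)]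
      exact hwnd.symm
  have hG2 : ∀ a ∈ idsB, ∀ b ∈ idsB, g a = g b → a = b := by
    have hgp : ∀ (p : Nat) (hp : p < idsB.length), g (idsB[p]'hp) = pvWnd runs L p := by
      intro p hp
      have h1 := List.getElem_of_eq hG1 (i := p) (by omega)
      simp only [List.getElem_map] at h1
      rw [← h1, hwsget p (by omega)]
    intro a ha b hb hab
    obtain ⟨p, hp, rfl⟩ := List.mem_iff_getElem.1 ha
    obtain ⟨q, hq, rfl⟩ := List.mem_iff_getElem.1 hb
    rw [hgp p hp, hgp q hq] at hab
    exact (hGood.2 p q hp hq).2 hab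
  have hSetMap : PySem.Set.ofList ws = (PySem.Set.ofList idsB).map g := by
    rw [hG1]
    exact pvSet_map g idsB hG2
  have hcountpt : ∀ x ∈ idsB, ws.count (g x) = idsB.count x := by
    intro x hx
    rw [hG1]
    exact pvCount_map g idsB x (fun a ha hgax => hG2 a ha x hx hgax)
  have hkey : ∀ x ∈ idsB, tupleStr (g x) =
      tupleStr (PySem.List.slice runs (some (cf.2.getD x 0))
        (some (cf.2.getD x 0 + pattern_length))) := by
    intro x hx
    have hi0 : idsB.idxOf x < idsB.length := List.idxOf_lt_length_of_mem hx
    rw [hfirst x hx, hplL, PySem.List.slice_natCast_add]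
    congr 1
    show ws.getD (idsB.idxOf x) [] = _
    rw [List.getD_eq_getElem ws [] (by omega), hwsget _ (by omega)]
    rfl
  -- ==== assemble ====
  rw [hA, hB, hpc, hc1]
  rw [PySem.Dict.items_counter, PySem.Dict.items_counter, List.foldl_map, List.foldl_map,
    hSetMap, List.foldl_map]
  have hfold := PySem.List.foldl_congr_mem (PySem.Set.ofList idsB)
    (fun (d : PySem.Dict String Int) x =>
      if 1 < ((ws.count (g x) : Nat) : Int) then
        d.insert (tupleStr (g x)) ((ws.count (g x) : Nat) : Int) else d)
    (fun (d : PySem.Dict String Int) x =>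
      if 1 < ((idsB.count x : Nat) : Int) then
        d.insert (tupleStr (PySem.List.slice runs (some (cf.2.getD x 0))
          (some (cf.2.getD x 0 + pattern_length)))) ((idsB.count x : Nat) : Int) else d)
    PySem.Dict.empty
    (by
      intro acc x hxset
      have hx : x ∈ idsB := (PySem.Set.mem_ofList _ _).1 hxset
      simp only [hcountpt x hx, hkey x hx])
  rw [hfold]

-- ===== VERDICT (by name: the statement is the Claim_ definition above) =====
theorem detect_scoring_patterns_spec : Claim_unchanged_detect_scoring_patterns := by
  intro runs pattern_length _ hnD
  exact pv_main runs pattern_length hnD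

theorem detect_scoring_patterns_changed : Claim_changed_detect_scoring_patterns := by
  unfold Claim_changed_detect_scoring_patterns; decide
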